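-- pv_equiv track=rewrite | github.com/javirk/Corruption | Funciones/funcionesMT.py | creaPersonas
-- ===== SOURCE A (Python) =====
-- def creaPersonas(S):
--     N = len(S)
--     for i in range(0, N):
--         if i < N/7:
--             S[i] = 'H'
--         elif i > N*3/4:
--             S[i] = 'R';
--         else:
--             S[i] = 'C';
--
--     return S
-- ===== SOURCE B (Python) =====
-- def creaPersonas(S):
--     N = len(S)
--     b1 = (N + 6) // 7            # number of indices i with i < N/7
--     r = min(N * 3 // 4 + 1, N)   # first index i with i > N*3/4 (clamped to N)
--     S[:b1] = ['H'] * b1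
--     S[b1:r] = ['C'] * (r - b1)
--     S[r:] = ['R'] * (N - r)
--     return S
-- ===== Notes on version B (the rewrite author's own statement) =====
-- stated objective: simpler
-- what changed: Replaces the per-element loop with a three-way float-threshold branch by computing the two boundary indices once (ceil(N/7) and floor(3N/4)+1) and bulk-filling three contiguous slices.
import Mathlib
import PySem

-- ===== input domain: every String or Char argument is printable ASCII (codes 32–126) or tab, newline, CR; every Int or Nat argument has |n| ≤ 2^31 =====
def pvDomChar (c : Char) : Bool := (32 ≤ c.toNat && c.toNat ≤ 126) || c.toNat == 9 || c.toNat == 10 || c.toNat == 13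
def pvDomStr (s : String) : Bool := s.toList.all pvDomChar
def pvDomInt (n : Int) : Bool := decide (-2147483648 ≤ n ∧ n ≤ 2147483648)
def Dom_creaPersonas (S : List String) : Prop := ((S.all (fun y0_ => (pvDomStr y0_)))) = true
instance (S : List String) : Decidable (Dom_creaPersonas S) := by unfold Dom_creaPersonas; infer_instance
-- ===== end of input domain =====

-- B replaces the per-element three-way float-threshold branch by computing the two boundary
-- indices once and emitting three bulk-filled contiguous blocks (objective: simpler).
-- A mutates S in place and returns it; B performs the same in-place slice assignments in Python;
-- the equivalence proved here is about the return value.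

-- ===== PORT A =====
-- 'i < N/7' and 'i > N*3/4' are Python float comparisons with integer i and N;
-- they are exact: ported as the equivalent integer comparisons 7*i < N and 4*i > 3*N
-- (the rational gap |N/7 - i| is ≥ 1/7 when nonzero, far above double rounding error
-- for any length N representable here; N*3/4 is exact in doubles for such N).
def creaPersonas (S : List String) : List String :=
  let N : Int := S.length
  (PySem.List.pyRange 0 N 1).foldl (fun acc i =>
    if 7 * i < N then acc.set i.toNat "H"
    else if 4 * i > 3 * N then acc.set i.toNat "R"
    else acc.set i.toNat "C") S

-- ===== PORT B =====
def creaPersonas_alt (S : List String) : List String :=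
  let N := S.length
  let b1 := (N + 6) / 7
  let r := min (N * 3 / 4 + 1) N
  List.replicate b1 "H" ++ List.replicate (r - b1) "C" ++ List.replicate (N - r) "R"

-- ===== PRECONDITION & SPEC =====
def Spec_creaPersonas (S : List String) (out : List String) : Prop := out = creaPersonas_alt S
instance (S : List String) (out : List String) : Decidable (Spec_creaPersonas S out) := by unfold Spec_creaPersonas; infer_instance

-- ===== CLAIM (what is proved, stated in full; the proofs are below) =====
def Claim_equal_creaPersonas : Prop := ∀ (S : List String), Dom_creaPersonas S → Spec_creaPersonas S (creaPersonas S)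

-- ===== LEMMAS AND PROOFS =====

def pvLabel (N i : Nat) : String :=
  if 7 * i < N then "H" else if 4 * i > 3 * N then "R" else "C"

theorem pvFold (S : List String) (k : Nat) (hk : k ≤ S.length) :
    (PySem.List.pyRange 0 (k : Int) 1).foldl (fun acc i =>
      if 7 * i < (S.length : Int) then acc.set i.toNat "H"
      else if 4 * i > 3 * (S.length : Int) then acc.set i.toNat "R"
      else acc.set i.toNat "C") S
    = (List.range k).map (pvLabel S.length) ++ S.drop k := by
  induction k with
  | zero => simp [PySem.List.pyRange_one_eq_nil]
  | succ k ih =>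
    have hk' : k ≤ S.length := Nat.le_of_succ_le hk
    have hsplit : PySem.List.pyRange 0 ((k : Int) + 1) 1
        = PySem.List.pyRange 0 (k : Int) 1 ++ [(k : Int)] :=
      PySem.List.pyRange_one_succ_right (by positivity)
    have hcast : ((k + 1 : Nat) : Int) = (k : Int) + 1 := by push_cast; ring
    rw [hcast, hsplit, List.foldl_append, ih hk']
    simp only [List.foldl_cons, List.foldl_nil]
    have hlt : k < S.length := hk
    have hdrop : S.drop k = S[k] :: S.drop (k + 1) := List.drop_eq_getElem_cons hlt
    have hlen : ((List.range k).map (pvLabel S.length)).length = k := by simp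
    have key : ∀ v : String, v = pvLabel S.length k →
        ((List.range k).map (pvLabel S.length) ++ S.drop k).set k v
        = (List.range (k + 1)).map (pvLabel S.length) ++ S.drop (k + 1) := by
      intro v hv
      rw [List.set_append_right _ _ (by omega), hlen, Nat.sub_self, hdrop,
        List.set_cons_zero, List.range_succ, List.map_append, List.append_assoc]
      simp [hv]
    have htoNat : ((k : Int)).toNat = k := Int.toNat_natCast k
    by_cases h1 : 7 * (k : Int) < (S.length : Int)
    · rw [if_pos h1, htoNat]
      exact key _ (by unfold pvLabel; rw [if_pos (by exact_mod_cast h1)])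
    · rw [if_neg h1]
      by_cases h2 : 4 * (k : Int) > 3 * (S.length : Int)
      · rw [if_pos h2, htoNat]
        refine key _ ?_
        unfold pvLabel
        rw [if_neg (by omega), if_pos (by exact_mod_cast h2)]
      · rw [if_neg h2, htoNat]
        refine key _ ?_
        unfold pvLabel
        rw [if_neg (by omega), if_neg (by omega)]

theorem pvBlocks (N b1 r : Nat) (h1 : 7 * b1 ≥ N) (h2 : 7 * b1 ≤ N + 6)
    (h3 : r ≤ N) (h4 : 4 * r ≤ 3 * N + 4) (h5 : r < N → 4 * r ≥ 3 * N + 1)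
    (h6 : b1 ≤ r) :
    (List.range N).map (pvLabel N)
    = List.replicate b1 "H" ++ List.replicate (r - b1) "C" ++ List.replicate (N - r) "R" := by
  apply List.ext_getElem
  · simp; omega
  · intro i hA hB
    simp only [List.getElem_map, List.getElem_range]
    have hi : i < N := by simpa using hA
    unfold pvLabel
    simp only [List.getElem_append, List.length_append, List.length_replicate,
      List.getElem_replicate]
    split_ifs <;> first | rfl | omega

theorem pvBlocksMin (N : Nat) :
    (List.range N).map (pvLabel N)
    = List.replicate ((N + 6) / 7) "H"
      ++ List.replicate (min (N * 3 / 4 + 1) N - (N + 6) / 7) "C"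
      ++ List.replicate (N - min (N * 3 / 4 + 1) N) "R" := by
  rcases le_total (N * 3 / 4 + 1) N with hm | hm
  · rw [min_eq_left hm]
    exact pvBlocks N _ _ (by omega) (by omega) (by omega) (by omega) (by omega) (by omega)
  · rw [min_eq_right hm]
    exact pvBlocks N _ _ (by omega) (by omega) (by omega) (by omega) (by omega) (by omega)

-- ===== VERDICT (by name: the statement is the Claim_ definition above) =====
theorem creaPersonas_spec : Claim_equal_creaPersonas := by
  intro S _
  show creaPersonas S = creaPersonas_alt S
  unfold creaPersonas creaPersonas_alt
  rw [pvFold S S.length le_rfl, List.drop_length, List.append_nil, pvBlocksMin]
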